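-- pv_equiv track=rewrite | github.com/Slendergator/enclose-horse-solver | enclose_solver.py | parse_editor_state
-- ===== SOURCE A (Python) =====
-- WATER = "~"
--
-- HORSE = "H"
--
-- CHERRY = "C"
--
-- APPLE = "a"
--
-- BEE = "e"
--
-- PORTAL_A = "P"
--
-- PORTAL_B = "Q"
--
-- def parse_editor_state(
--     grid_cells: list[list[str]],
--     budget: int,
-- ) -> tuple[
--     list[list[bool]],
--     tuple[int, int] | None,
--     list[list[bool]],
--     list[list[bool]],
--     list[list[bool]],
--     list[list[tuple[int, int]]],
-- ]:
--     """
--     Convert editor grid and budget to solver inputs.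
--     Returns (grid_water, horse_pos, is_cherry, is_apple, is_bee, portal_pairs).
--     portal_pairs is a list of [portal_a_cells, portal_b_cells] for each pair.
--     """
--     M = len(grid_cells)
--     N = len(grid_cells[0]) if grid_cells else 0
--     grid_water = [[False] * N for _ in range(M)]
--     is_cherry = [[False] * N for _ in range(M)]
--     is_apple = [[False] * N for _ in range(M)]
--     is_bee = [[False] * N for _ in range(M)]
--     horse_pos: tuple[int, int] | None = None
--     portal_a_cells: list[tuple[int, int]] = []
--     portal_b_cells: list[tuple[int, int]] = []
--
--     for i in range(M):
--         for j in range(N):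
--             ch = grid_cells[i][j]
--             if ch == WATER:
--                 grid_water[i][j] = True
--             elif ch == HORSE:
--                 horse_pos = (i, j)
--             elif ch == CHERRY:
--                 is_cherry[i][j] = True
--             elif ch == APPLE:
--                 is_apple[i][j] = True
--             elif ch == BEE:
--                 is_bee[i][j] = True
--             elif ch == PORTAL_A:
--                 portal_a_cells.append((i, j))
--             elif ch == PORTAL_B:
--                 portal_b_cells.append((i, j))
--
--     portal_pairs = [portal_a_cells, portal_b_cells]
--     if portal_a_cells or portal_b_cells:
--         portal_pairs = [[portal_a_cells, portal_b_cells]]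
--     else:
--         portal_pairs = []
--
--     return grid_water, horse_pos, is_cherry, is_apple, is_bee, portal_pairs
-- ===== SOURCE B (Python) =====
-- WATER = "~"
-- HORSE = "H"
-- CHERRY = "C"
-- APPLE = "a"
-- BEE = "e"
-- PORTAL_A = "P"
-- PORTAL_B = "Q"
--
--
-- def parse_editor_state(grid_cells, budget):
--     N = len(grid_cells[0]) if grid_cells else 0
--
--     def mask(ch):
--         return [[row[j] == ch for j in range(N)] for row in grid_cells]
--
--     def positions(ch):
--         return [(i, j)
--                 for i, row in enumerate(grid_cells)
--                 for j in range(N) if row[j] == ch]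
--
--     horses = positions(HORSE)
--     horse_pos = horses[-1] if horses else None
--     pa = positions(PORTAL_A)
--     pb = positions(PORTAL_B)
--     portal_pairs = [[pa, pb]] if pa or pb else []
--     return mask(WATER), horse_pos, mask(CHERRY), mask(APPLE), mask(BEE), portal_pairs
-- ===== Notes on version B (the rewrite author's own statement) =====
-- stated objective: simpler
-- what changed: Replaces the single combined loop that mutates five pre-allocated structures through an if/elif chain with independent per-sentinel passes: each boolean matrix is a nested comprehension comparing cells to its sentinel, horse_pos is the last element of a position filter, and the portal lists are position filters.
import Mathlib
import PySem

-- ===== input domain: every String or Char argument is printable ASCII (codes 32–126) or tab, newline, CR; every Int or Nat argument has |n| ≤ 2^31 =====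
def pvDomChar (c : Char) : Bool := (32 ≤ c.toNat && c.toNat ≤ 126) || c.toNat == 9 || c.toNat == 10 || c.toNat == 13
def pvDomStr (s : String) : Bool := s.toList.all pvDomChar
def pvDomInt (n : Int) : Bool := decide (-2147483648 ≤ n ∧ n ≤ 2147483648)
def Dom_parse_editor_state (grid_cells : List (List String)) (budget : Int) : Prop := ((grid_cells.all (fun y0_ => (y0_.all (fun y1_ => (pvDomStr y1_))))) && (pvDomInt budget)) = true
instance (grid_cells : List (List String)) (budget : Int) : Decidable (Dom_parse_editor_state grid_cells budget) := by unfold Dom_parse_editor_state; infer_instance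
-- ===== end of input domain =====

-- B replaces A's single combined loop (mutating five structures through an if/elif chain)
-- by independent per-sentinel passes: one comprehension-style map per boolean matrix,
-- horse_pos as the last element of a position filter, portal lists as position filters.
-- Objective: simpler (same O(M*N) cost).

-- ===== PORT A =====
-- the body of A's inner loop: the if/elif chain on grid_cells[i][j], updating the 7-part state
-- (grid_water, horse_pos, is_cherry, is_apple, is_bee, portal_a_cells, portal_b_cells)
def pvCellStepA (i j : Nat) (ch : String)
    (st : List (List Bool) × Option (Int × Int) × List (List Bool) × List (List Bool) × List (List Bool) × List (Int × Int) × List (Int × Int)) :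
    List (List Bool) × Option (Int × Int) × List (List Bool) × List (List Bool) × List (List Bool) × List (Int × Int) × List (Int × Int) :=
  let (gw, hp, ic, ia, ib, pa, pb) := st
  if ch = "~" then (gw.set i ((gw.getD i []).set j true), hp, ic, ia, ib, pa, pb)
  else if ch = "H" then (gw, some ((i : Int), (j : Int)), ic, ia, ib, pa, pb)
  else if ch = "C" then (gw, hp, ic.set i ((ic.getD i []).set j true), ia, ib, pa, pb)
  else if ch = "a" then (gw, hp, ic, ia.set i ((ia.getD i []).set j true), ib, pa, pb)
  else if ch = "e" then (gw, hp, ic, ia, ib.set i ((ib.getD i []).set j true), pa, pb)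
  else if ch = "P" then (gw, hp, ic, ia, ib, pa ++ [((i : Int), (j : Int))], pb)
  else if ch = "Q" then (gw, hp, ic, ia, ib, pa, pb ++ [((i : Int), (j : Int))])
  else (gw, hp, ic, ia, ib, pa, pb)

def parse_editor_state (grid_cells : List (List String)) (budget : Int) : List (List Bool) × (Option (Int × Int)) × List (List Bool) × List (List Bool) × List (List Bool) × (List (List (List (Int × Int)))) :=
  let M := grid_cells.length
  let N := if grid_cells.isEmpty then 0 else (grid_cells.headD []).length
  -- four M×N False matrices, horse_pos = None, two empty portal lists
  let init : List (List Bool) × Option (Int × Int) × List (List Bool) × List (List Bool) × List (List Bool) × List (Int × Int) × List (Int × Int) :=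
    (List.replicate M (List.replicate N false), none, List.replicate M (List.replicate N false),
     List.replicate M (List.replicate N false), List.replicate M (List.replicate N false), [], [])
  -- for i in range(M): for j in range(N): ch = grid_cells[i][j]; …
  -- i < M always; grid_cells[i][j] is exact via getD under Pre_ (Python raises IndexError exactly where j ≥ len(grid_cells[i]))
  let st := (List.range M).foldl (fun st i =>
    (List.range N).foldl (fun st j => pvCellStepA i j ((grid_cells.getD i []).getD j "") st) st) init
  let (gw, hp, ic, ia, ib, pa, pb) := st
  -- portal_pairs = [[pa, pb]] if pa or pb else []
  let portal_pairs := if pa ≠ [] ∨ pb ≠ [] then [[pa, pb]] else []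
  (gw, hp, ic, ia, ib, portal_pairs)

-- ===== PORT B =====
-- mask(ch) = [[row[j] == ch for j in range(N)] for row in grid_cells]
def pvMaskB (grid_cells : List (List String)) (N : Nat) (ch : String) : List (List Bool) :=
  grid_cells.map (fun row => (List.range N).map (fun j => decide (row.getD j "" = ch)))

-- positions(ch) = [(i, j) for i, row in enumerate(grid_cells) for j in range(N) if row[j] == ch]
def pvPositionsB (grid_cells : List (List String)) (N : Nat) (ch : String) : List (Int × Int) :=
  grid_cells.zipIdx.flatMap (fun p =>
    ((List.range N).filter (fun j => decide (p.1.getD j "" = ch))).map (fun (j : Nat) => ((p.2 : Int), (j : Int))))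

def parse_editor_state_alt (grid_cells : List (List String)) (budget : Int) : List (List Bool) × (Option (Int × Int)) × List (List Bool) × List (List Bool) × List (List Bool) × (List (List (List (Int × Int)))) :=
  let N := if grid_cells.isEmpty then 0 else (grid_cells.headD []).length
  let horses := pvPositionsB grid_cells N "H"
  let horse_pos := horses.getLast?                -- horses[-1] if horses else None
  let pa := pvPositionsB grid_cells N "P"
  let pb := pvPositionsB grid_cells N "Q"
  (pvMaskB grid_cells N "~", horse_pos, pvMaskB grid_cells N "C", pvMaskB grid_cells N "a",
   pvMaskB grid_cells N "e", if pa ≠ [] ∨ pb ≠ [] then [[pa, pb]] else [])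

-- ===== PRECONDITION & SPEC =====
-- Pre_ excludes exactly the ragged grids on which Python A raises IndexError (some row shorter
-- than the first row, whose length is N); B raises the same way there, nothing else is excluded.
def Pre_parse_editor_state (grid_cells : List (List String)) (budget : Int) : Prop :=
  ∀ row ∈ grid_cells, (grid_cells.headD []).length ≤ row.length
instance (grid_cells : List (List String)) (budget : Int) : Decidable (Pre_parse_editor_state grid_cells budget) := by unfold Pre_parse_editor_state; infer_instance

def pvWitness_parse_editor_state : List (List String) × Int := ([["~", "H"], ["P", "Q"]], 3)

def Spec_parse_editor_state (grid_cells : List (List String)) (budget : Int) (out : List (List Bool) × (Option (Int × Int)) × List (List Bool) × List (List Bool) × List (List Bool) × (List (List (List (Int × Int))))) : Prop := out = parse_editor_state_alt grid_cells budget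
instance (grid_cells : List (List String)) (budget : Int) (out : List (List Bool) × (Option (Int × Int)) × List (List Bool) × List (List Bool) × List (List Bool) × (List (List (List (Int × Int))))) : Decidable (Spec_parse_editor_state grid_cells budget out) := by
  unfold Spec_parse_editor_state
  exact @instDecidableEqProd _ _ inferInstance (@instDecidableEqProd _ _ inferInstance (@instDecidableEqProd _ _ inferInstance (@instDecidableEqProd _ _ inferInstance (@instDecidableEqProd _ _ inferInstance inferInstance)))) _ _

-- ===== CLAIM (what is proved, stated in full; the proofs are below) =====
def Claim_equal_parse_editor_state : Prop := ∀ (grid_cells : List (List String)) (budget : Int), Dom_parse_editor_state grid_cells budget → Pre_parse_editor_state grid_cells budget → Spec_parse_editor_state grid_cells budget (parse_editor_state grid_cells budget)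

-- ===== LEMMAS AND PROOFS =====

-- per-component views of A's combined step
def pvStepMat (s : String) (i j : Nat) (ch : String) (m : List (List Bool)) : List (List Bool) :=
  if ch = s then m.set i ((m.getD i []).set j true) else m
def pvStepHp (i j : Nat) (ch : String) (hp : Option (Int × Int)) : Option (Int × Int) :=
  if ch = "H" then some ((i : Int), (j : Int)) else hp
def pvStepApp (s : String) (i j : Nat) (ch : String) (l : List (Int × Int)) : List (Int × Int) :=
  if ch = s then l ++ [((i : Int), (j : Int))] else l

lemma pvCellStepA_eq (i j : Nat) (ch : String)
    (gw : List (List Bool)) (hp : Option (Int × Int)) (ic ia ib : List (List Bool)) (pa pb : List (Int × Int)) :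
    pvCellStepA i j ch (gw, hp, ic, ia, ib, pa, pb) =
      (pvStepMat "~" i j ch gw, pvStepHp i j ch hp, pvStepMat "C" i j ch ic,
       pvStepMat "a" i j ch ia, pvStepMat "e" i j ch ib,
       pvStepApp "P" i j ch pa, pvStepApp "Q" i j ch pb) := by
  simp only [pvCellStepA, pvStepMat, pvStepHp, pvStepApp]
  split_ifs <;> subst_vars <;> simp_all

-- the inner (j-)fold acts componentwise
lemma pvInnerSplit (grid : List (List String)) (i : Nat) (l : List Nat) :
    ∀ gw hp ic ia ib pa pb,
    l.foldl (fun st j => pvCellStepA i j ((grid.getD i []).getD j "") st) (gw, hp, ic, ia, ib, pa, pb) =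
      (l.foldl (fun m j => pvStepMat "~" i j ((grid.getD i []).getD j "") m) gw,
       l.foldl (fun h j => pvStepHp i j ((grid.getD i []).getD j "") h) hp,
       l.foldl (fun m j => pvStepMat "C" i j ((grid.getD i []).getD j "") m) ic,
       l.foldl (fun m j => pvStepMat "a" i j ((grid.getD i []).getD j "") m) ia,
       l.foldl (fun m j => pvStepMat "e" i j ((grid.getD i []).getD j "") m) ib,
       l.foldl (fun acc j => pvStepApp "P" i j ((grid.getD i []).getD j "") acc) pa,
       l.foldl (fun acc j => pvStepApp "Q" i j ((grid.getD i []).getD j "") acc) pb) := by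
  induction l with
  | nil => intros; rfl
  | cons a t ih =>
      intro gw hp ic ia ib pa pb
      simp only [List.foldl_cons]
      rw [pvCellStepA_eq]
      exact ih _ _ _ _ _ _ _

-- the outer (i-)fold acts componentwise
lemma pvOuterSplit (grid : List (List String)) (N : Nat) (l : List Nat) :
    ∀ gw hp ic ia ib pa pb,
    l.foldl (fun st i => (List.range N).foldl (fun st j => pvCellStepA i j ((grid.getD i []).getD j "") st) st) (gw, hp, ic, ia, ib, pa, pb) =
      (l.foldl (fun m i => (List.range N).foldl (fun m j => pvStepMat "~" i j ((grid.getD i []).getD j "") m) m) gw,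
       l.foldl (fun h i => (List.range N).foldl (fun h j => pvStepHp i j ((grid.getD i []).getD j "") h) h) hp,
       l.foldl (fun m i => (List.range N).foldl (fun m j => pvStepMat "C" i j ((grid.getD i []).getD j "") m) m) ic,
       l.foldl (fun m i => (List.range N).foldl (fun m j => pvStepMat "a" i j ((grid.getD i []).getD j "") m) m) ia,
       l.foldl (fun m i => (List.range N).foldl (fun m j => pvStepMat "e" i j ((grid.getD i []).getD j "") m) m) ib,
       l.foldl (fun acc i => (List.range N).foldl (fun acc j => pvStepApp "P" i j ((grid.getD i []).getD j "") acc) acc) pa,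
       l.foldl (fun acc i => (List.range N).foldl (fun acc j => pvStepApp "Q" i j ((grid.getD i []).getD j "") acc) acc) pb) := by
  induction l with
  | nil => intros; rfl
  | cons a t ih =>
      intro gw hp ic ia ib pa pb
      simp only [List.foldl_cons]
      rw [pvInnerSplit]
      exact ih _ _ _ _ _ _ _

lemma pvSetSelf (m : List (List Bool)) (i : Nat) : m.set i (m.getD i []) = m := by
  rcases Nat.lt_or_ge i m.length with h | h
  · simp [List.getD, List.getElem?_eq_getElem h]
  · simp [List.set_eq_of_length_le h]

lemma pvGetDSet (m : List (List Bool)) (i : Nat) (v : List Bool) (h : i < m.length) :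
    (m.set i v).getD i [] = v := by
  simp [List.getD, h]

-- a row-vector fold of cell-sets, characterised positionally
lemma pvVecFold (row : List String) (s : String) :
    ∀ (N : Nat) (v0 : List Bool), N ≤ v0.length →
    (List.range N).foldl (fun v j => if row.getD j "" = s then v.set j true else v) v0 =
      (List.range N).map (fun j => if row.getD j "" = s then true else v0.getD j false) ++ v0.drop N := by
  intro N
  induction N with
  | zero => intro v0 _; simp
  | succ N ih =>
      intro v0 h
      have hN : N < v0.length := h
      rw [List.range_succ, List.foldl_append, List.foldl_cons, List.foldl_nil, ih v0 (Nat.le_of_lt hN),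
        List.drop_eq_getElem_cons hN]
      by_cases hc : row.getD N "" = s
      · rw [if_pos hc, List.set_append_right _ _ (by simp), List.map_append]
        simp only [List.getD] at hc
        simp [hc]
        rw [List.drop_eq_getElem_cons hN, List.set_cons_zero]
      · rw [if_neg hc, List.map_append]
        simp only [List.getD] at hc
        simp [hc]
        rw [List.drop_eq_getElem_cons hN]
        simp [List.getElem?_eq_getElem hN]

-- the matrix fold over one row only rewrites row i
lemma pvMatInner (grid : List (List String)) (s : String) (i : Nat) (l : List Nat) :
    ∀ m : List (List Bool), i < m.length →
    l.foldl (fun m j => pvStepMat s i j ((grid.getD i []).getD j "") m) m =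
      m.set i (l.foldl (fun v j => if (grid.getD i []).getD j "" = s then v.set j true else v) (m.getD i [])) := by
  induction l with
  | nil => intro m _; rw [List.foldl_nil, List.foldl_nil, pvSetSelf]
  | cons a t ih =>
      intro m hm
      rw [List.foldl_cons, List.foldl_cons]
      by_cases hc : (grid.getD i []).getD a "" = s
      · rw [show pvStepMat s i a ((grid.getD i []).getD a "") m = m.set i ((m.getD i []).set a true) from by
            unfold pvStepMat; exact if_pos hc,
          if_pos hc, ih _ (by simpa using hm), pvGetDSet _ _ _ hm, List.set_set]
      · rw [show pvStepMat s i a ((grid.getD i []).getD a "") m = m from by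
            unfold pvStepMat; exact if_neg hc,
          if_neg hc, ih _ hm]

-- full matrix fold = per-row masks (invariant over the processed prefix)
lemma pvMatOuter (grid : List (List String)) (N : Nat) (s : String) :
    ∀ k, k ≤ grid.length →
    (List.range k).foldl (fun m i => (List.range N).foldl (fun m j => pvStepMat s i j ((grid.getD i []).getD j "") m) m)
      (List.replicate grid.length (List.replicate N false)) =
      (grid.take k).map (fun row => (List.range N).map (fun j => decide (row.getD j "" = s))) ++
        List.replicate (grid.length - k) (List.replicate N false) := by
  intro k
  induction k with
  | zero => intro _; simp
  | succ k ih =>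
      intro h
      have hk : k < grid.length := h
      rw [List.range_succ, List.foldl_append, List.foldl_cons, List.foldl_nil, ih (Nat.le_of_lt hk)]
      have hlen : ((grid.take k).map (fun row => (List.range N).map (fun j => decide (row.getD j "" = s)))).length = k := by
        simp [Nat.le_of_lt hk]
      have hrep : grid.length - k = (grid.length - (k + 1)) + 1 := by omega
      rw [pvMatInner grid s k _ _ (by simp; omega)]
      have hget : (((grid.take k).map (fun row => (List.range N).map (fun j => decide (row.getD j "" = s)))) ++
          List.replicate (grid.length - k) (List.replicate N false)).getD k [] = List.replicate N false := by
        rw [List.getD, List.getElem?_append_right (by omega), hlen]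
        simp [hrep]
      rw [hget, pvVecFold _ _ _ _ (by simp)]
      have hbody : (List.range N).map (fun j => if (grid.getD k []).getD j "" = s then true else (List.replicate N false).getD j false) =
          (List.range N).map (fun j => decide ((grid.getD k []).getD j "" = s)) := by
        apply List.map_congr_left
        intro j _
        by_cases hc : (grid.getD k []).getD j "" = s <;> simp [hc]
      rw [hbody, List.drop_eq_nil_of_le (by simp), List.append_nil,
        List.set_append_right _ _ (by omega), hlen, Nat.sub_self,
        List.take_succ_eq_append_getElem hk, List.map_append, hrep, List.replicate_succ,
        List.set_cons_zero, List.append_assoc]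
      simp [List.getD, List.getElem?_eq_getElem hk]

lemma pvGetLastCons {α : Type} (a : α) (l : List α) : (a :: l).getLast? = l.getLast?.or (some a) := by
  rw [show a :: l = [a] ++ l from rfl, List.getLast?_append]; rfl

lemma pvOrSomeOr {α : Type} (x : Option α) (a : α) (y : Option α) :
    (x.or (some a)).or y = x.or (some a) := by cases x <;> rfl

-- "keep the last match" fold = getLast? of the filtered positions
lemma pvFoldLastOpt {γ : Type} (p : γ → Prop) [DecidablePred p] (e : γ → Int × Int) (l : List γ) :
    ∀ h0 : Option (Int × Int),
    l.foldl (fun h x => if p x then some (e x) else h) h0 =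
      ((l.filter (fun x => decide (p x))).map e).getLast?.or h0 := by
  induction l with
  | nil => intro h0; rfl
  | cons a t ih =>
      intro h0
      by_cases hc : p a
      · rw [List.foldl_cons, if_pos hc, ih, List.filter_cons_of_pos (by simp [hc]), List.map_cons,
          pvGetLastCons, pvOrSomeOr]
      · rw [List.foldl_cons, if_neg hc, ih, List.filter_cons_of_neg (by simp [hc])]

lemma pvFoldOrLast {γ : Type} (g : γ → List (Int × Int)) (l : List γ) :
    ∀ h0, l.foldl (fun h x => (g x).getLast?.or h) h0 = (l.flatMap g).getLast?.or h0 := by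
  induction l with
  | nil => intro h0; rfl
  | cons a t ih =>
      intro h0
      rw [List.foldl_cons, ih, List.flatMap_cons, List.getLast?_append, Option.or_assoc]

lemma pvZipIdx (grid : List (List String)) :
    grid.zipIdx = (List.range grid.length).map (fun i => (grid.getD i [], i)) := by
  apply List.ext_getElem
  · simp
  · intro i h1 h2
    simp at h1
    simp [List.getD, List.getElem?_eq_getElem h1]

lemma pvPositionsB_eq (grid : List (List String)) (N : Nat) (ch : String) :
    pvPositionsB grid N ch =
      (List.range grid.length).flatMap (fun i =>
        ((List.range N).filter (fun j => decide ((grid.getD i []).getD j "" = ch))).map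
          (fun (j : Nat) => ((i : Int), (j : Int)))) := by
  rw [pvPositionsB, pvZipIdx, List.flatMap_map]

lemma pvHorseEval (grid : List (List String)) (N : Nat) :
    (List.range grid.length).foldl (fun hp i =>
        (List.range N).foldl (fun hp j => pvStepHp i j ((grid.getD i []).getD j "") hp) hp) none =
      (pvPositionsB grid N "H").getLast? := by
  have hfold : (List.range grid.length).foldl (fun hp i =>
        (List.range N).foldl (fun hp j => pvStepHp i j ((grid.getD i []).getD j "") hp) hp) none =
      (List.range grid.length).foldl (fun hp i =>
        ((((List.range N).filter (fun j => decide ((grid.getD i []).getD j "" = "H"))).map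
          (fun (j : Nat) => ((i : Int), (j : Int)))).getLast?).or hp) none := by
    apply PySem.List.foldl_congr_mem
    intro hp i _
    exact pvFoldLastOpt (fun j => (grid.getD i []).getD j "" = "H") (fun (j : Nat) => ((i : Int), (j : Int))) _ hp
  rw [hfold, pvFoldOrLast, pvPositionsB_eq, Option.or_none]

lemma pvPortalEval (grid : List (List String)) (N : Nat) (s : String) :
    (List.range grid.length).foldl (fun acc i =>
        (List.range N).foldl (fun acc j => pvStepApp s i j ((grid.getD i []).getD j "") acc) acc) [] =
      pvPositionsB grid N s := by
  have hfold : (List.range grid.length).foldl (fun acc i =>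
        (List.range N).foldl (fun acc j => pvStepApp s i j ((grid.getD i []).getD j "") acc) acc) [] =
      (List.range grid.length).foldl (fun acc i =>
        acc ++ ((List.range N).filter (fun j => decide ((grid.getD i []).getD j "" = s))).map
          (fun (j : Nat) => ((i : Int), (j : Int)))) [] := by
    apply PySem.List.foldl_congr_mem
    intro acc i _
    have hfun : (fun (acc : List (Int × Int)) (j : Nat) => pvStepApp s i j ((grid.getD i []).getD j "") acc) =
        (fun acc j => if (fun j => decide ((grid.getD i []).getD j "" = s)) j then acc ++ [((i : Int), (j : Int))] else acc) := by
      funext acc j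
      simp [pvStepApp]
    rw [hfun, PySem.List.foldl_append_if]
  rw [hfold, PySem.List.foldl_append_eq_flatMap, pvPositionsB_eq, List.nil_append]

lemma pvMatEval (grid : List (List String)) (N : Nat) (s : String) :
    (List.range grid.length).foldl (fun m i =>
        (List.range N).foldl (fun m j => pvStepMat s i j ((grid.getD i []).getD j "") m) m)
      (List.replicate grid.length (List.replicate N false)) = pvMaskB grid N s := by
  rw [pvMatOuter grid N s grid.length le_rfl, List.take_length, Nat.sub_self]
  simp [pvMaskB]

-- ===== VERDICT (by name: the statement is the Claim_ definition above) =====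
theorem parse_editor_state_spec : Claim_equal_parse_editor_state := by
  intro grid_cells budget _ _
  unfold Spec_parse_editor_state
  show parse_editor_state grid_cells budget = parse_editor_state_alt grid_cells budget
  simp only [parse_editor_state, parse_editor_state_alt]
  rw [pvOuterSplit, pvMatEval, pvMatEval, pvMatEval, pvMatEval, pvHorseEval, pvPortalEval, pvPortalEval]
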